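-- pv_equiv track=rewrite | github.com/Fondamenti18/fondamenti-di-programmazione | students/1808728/homework04/program01.py | ricerca_chiave
-- ===== SOURCE A (Python) =====
-- def ricerca_chiave(dga):
--     m = list(dga.values())
--     m = [item for sublist in m for item in sublist]
--     m1 = list(dga.keys())
--     for i in range(len(m1)):
--         if m1[i] not in m:
--             if i > 0:
--                 dga = list(dga.items())
--                 m3 = dga[i]
--                 del dga[i]
--                 dga = [m3] + dga
--                 dga = dict(dga)
--     return(dga)
-- ===== SOURCE B (Python) =====
-- def ricerca_chiave(dga):
--     flat = [x for vs in dga.values() for x in vs]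
--     move, rest = [], []
--     for i, kv in enumerate(dga.items()):
--         if i > 0 and kv[0] not in flat:
--             move.append(kv)
--         else:
--             rest.append(kv)
--     return dict(move[::-1] + rest)
-- ===== Notes on version B (the rewrite author's own statement) =====
-- stated objective: faster
-- what changed: Instead of repeatedly rebuilding the dict (list/del/prepend/dict round per absent key), B computes the final key order in one pass: it partitions the items into 'move' (index>0, key absent from the flattened values) and 'rest', and returns dict(reversed(move) + rest).
import Mathlib
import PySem

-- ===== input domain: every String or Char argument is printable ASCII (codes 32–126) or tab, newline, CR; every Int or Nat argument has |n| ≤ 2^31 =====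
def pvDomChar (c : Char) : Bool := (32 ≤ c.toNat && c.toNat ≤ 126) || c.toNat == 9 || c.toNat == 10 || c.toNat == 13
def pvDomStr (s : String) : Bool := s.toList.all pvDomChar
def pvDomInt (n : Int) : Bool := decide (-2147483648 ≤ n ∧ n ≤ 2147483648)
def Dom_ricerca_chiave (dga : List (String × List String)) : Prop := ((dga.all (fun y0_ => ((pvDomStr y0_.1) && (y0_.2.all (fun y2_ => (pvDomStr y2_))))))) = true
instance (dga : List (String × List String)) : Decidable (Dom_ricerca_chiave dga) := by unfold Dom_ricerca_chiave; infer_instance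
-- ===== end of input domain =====

-- B replaces A's repeated dict rebuilding (one list/del/prepend/dict round per moved key) by a
-- single partitioning pass that computes the final item order once (objective: faster, measured).

-- ===== PORT A =====
-- loop body of A: 'if m1[i] not in m: if i > 0: dga = list(dga.items()); m3 = dga[i]; del dga[i]; dga = [m3] + dga; dga = dict(dga)'
def pvStepA (m1 m : List String) (st : List (String × List String)) (i : Int) : List (String × List String) :=
  match PySem.List.pyGet? m1 i with
  | none => st        -- unreachable: i ranges over range(len(m1)) and the state keeps length len(m1)
  | some k =>
    if !(m.contains k) then
      if i > 0 then
        match PySem.List.pop? st i with    -- m3 = dga[i]; del dga[i]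
        | none => st  -- unreachable (index in range)
        | some (m3, rest) => (PySem.Dict.ofList ([m3] ++ rest)).items   -- dga = dict([m3] + dga)
      else st
    else st

def ricerca_chiave (dga : List (String × List String)) : List (String × List String) :=
  let m0 := dga.map Prod.snd                      -- m = list(dga.values())
  let m := m0.flatMap (fun sublist => sublist)    -- m = [item for sublist in m for item in sublist]
  let m1 := dga.map Prod.fst                      -- m1 = list(dga.keys())
  (PySem.List.pyRange 0 (m1.length : Int)).foldl (pvStepA m1 m) dga

-- ===== PORT B =====
-- loop body of B: append kv to move (index > 0 and key absent from flat) or to rest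
def pvStepB (flat : List String)
    (mr : List (String × List String) × List (String × List String))
    (p : Int × (String × List String)) : List (String × List String) × List (String × List String) :=
  if p.1 > 0 && !(flat.contains p.2.1) then (mr.1 ++ [p.2], mr.2) else (mr.1, mr.2 ++ [p.2])

def ricerca_chiave_alt (dga : List (String × List String)) : List (String × List String) :=
  let flat := dga.flatMap Prod.snd                                    -- flat = [x for vs in dga.values() for x in vs]
  let mr := (PySem.List.enumerate dga).foldl (pvStepB flat) ([], [])  -- for i, kv in enumerate(dga.items()): …
  (PySem.Dict.ofList (mr.1.reverse ++ mr.2)).items                    -- dict(move[::-1] + rest); [::-1] is List.reverse (exact)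

-- ===== PRECONDITION & SPEC =====
-- The argument models a Python dict, which cannot hold duplicate keys: assoc lists with a
-- repeated key correspond to no input the Python function can receive, so they are excluded.
def Pre_ricerca_chiave (dga : List (String × List String)) : Prop := (dga.map Prod.fst).Nodup
instance (dga : List (String × List String)) : Decidable (Pre_ricerca_chiave dga) := by unfold Pre_ricerca_chiave; infer_instance

def pvWitness_ricerca_chiave : (List (String × List String)) := [("a", ["b"]), ("b", []), ("c", ["a"])]

def Spec_ricerca_chiave (dga : List (String × List String)) (out : List (String × List String)) : Prop := out = ricerca_chiave_alt dga
instance (dga : List (String × List String)) (out : List (String × List String)) : Decidable (Spec_ricerca_chiave dga out) := by unfold Spec_ricerca_chiave; infer_instance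

-- ===== CLAIM (what is proved, stated in full; the proofs are below) =====
def Claim_equal_ricerca_chiave : Prop := ∀ (dga : List (String × List String)), Dom_ricerca_chiave dga → Pre_ricerca_chiave dga → Spec_ricerca_chiave dga (ricerca_chiave dga)

-- ===== LEMMAS AND PROOFS =====

-- dict(pairs) on pairs with pairwise-distinct keys is the identity (as an items list)
lemma pv_items_ofList (l : List (String × List String)) (h : (l.map Prod.fst).Nodup) :
    (PySem.Dict.ofList l).items = l := by
  have := PySem.Dict.items_foldl_insert_fresh l Prod.fst Prod.snd (PySem.Dict.empty)
    (by intro a _; rfl) h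
  simpa [PySem.Dict.ofList, PySem.Dict.update, PySem.Dict.empty] using this

-- invariant of A's loop from index i ≥ 1 on: the state is reverse(moved) ++ kept ++ remaining,
-- and the loop moves exactly the remaining items whose key is absent from `flat`
lemma pv_loopA_inv (m1 flat : List String) :
    ∀ (r : List (String × List String)) (i : Nat) (mv c : List (String × List String)),
    mv.length + c.length = i → 1 ≤ i →
    m1.length = i + r.length →
    m1.drop i = r.map Prod.fst →
    ((mv.reverse ++ c ++ r).map Prod.fst).Nodup →
    (PySem.List.pyRange (i : Int) (m1.length : Int)).foldl (pvStepA m1 flat) (mv.reverse ++ c ++ r)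
      = (mv ++ r.filter (fun kv => !(flat.contains kv.1))).reverse
        ++ (c ++ r.filter (fun kv => flat.contains kv.1)) := by
  intro r
  induction r with
  | nil =>
    intro i mv c hlen h1 hmlen hdrop hnd
    rw [PySem.List.pyRange_one_eq_nil (by simp at hmlen; exact_mod_cast (by omega : m1.length ≤ i))]
    simp
  | cons kv r' ih =>
    intro i mv c hlen h1 hmlen hdrop hnd
    have hlt : (i:Int) < (m1.length:Int) := by
      have h : i < m1.length := by simp only [List.length_cons] at hmlen; omega
      exact_mod_cast h
    rw [PySem.List.pyRange_one_cons hlt]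
    simp only [List.foldl_cons]
    have hget : PySem.List.pyGet? m1 (i:Int) = some kv.1 := by
      rw [PySem.List.pyGet?_natCast]
      have h0 : (List.drop i m1)[0]? = some kv.1 := by rw [hdrop]; rfl
      rw [List.getElem?_drop] at h0; simpa using h0
    have hcast : (i:Int) + 1 = ((i+1 : Nat) : Int) := by push_cast; ring
    have hdrop' : List.drop (i+1) m1 = r'.map Prod.fst := by
      have h2 := congrArg (List.drop 1) hdrop
      rw [List.drop_drop] at h2
      simpa [Nat.add_comm] using h2
    by_cases hc : kv.1 ∈ flat
    · have hstep : pvStepA m1 flat (mv.reverse ++ c ++ (kv :: r')) (i:Int)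
          = mv.reverse ++ c ++ (kv :: r') := by
        simp [pvStepA, hget, hc]
      rw [hstep]
      have hst : mv.reverse ++ c ++ (kv :: r') = mv.reverse ++ (c ++ [kv]) ++ r' := by simp
      rw [hst, hcast, ih (i+1) mv (c ++ [kv]) (by simp; omega) (by omega)
        (by simp at hmlen ⊢; omega) hdrop' (by rw [← hst]; exact hnd)]
      simp [hc]
    · have hpos : (0:Int) < (i:Int) := by exact_mod_cast (by omega : 0 < i)
      have hL1 : (mv.reverse ++ c).length = i := by simp; omega
      have hilen : i < (mv.reverse ++ c ++ (kv :: r')).length := by simp; omega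
      have hpop := PySem.List.pop?_natCast (mv.reverse ++ c ++ (kv :: r')) i hilen
      have hgi : (mv.reverse ++ c ++ (kv :: r'))[i]'hilen = kv := by
        rw [List.getElem_append_right (by omega)]
        simp [hL1]
      have herase : (mv.reverse ++ c ++ (kv :: r')).eraseIdx i = mv.reverse ++ c ++ r' := by
        rw [List.eraseIdx_append_of_length_le (le_of_eq hL1)]
        simp [hL1]
      rw [hgi, herase] at hpop
      have hndnew : ((kv :: (mv.reverse ++ c ++ r')).map Prod.fst).Nodup := by
        have hperm : (mv.reverse ++ c ++ (kv :: r')).Perm (kv :: (mv.reverse ++ c ++ r')) := by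
          simpa using (List.perm_middle (a := kv) (l₁ := mv.reverse ++ c) (l₂ := r'))
        exact ((hperm.map Prod.fst).nodup_iff).mp hnd
      have hstep : pvStepA m1 flat (mv.reverse ++ c ++ (kv :: r')) (i:Int)
          = kv :: (mv.reverse ++ c ++ r') := by
        simp only [pvStepA, hget]
        simp only [List.contains_eq_mem, hc, decide_false, Bool.not_false, hpos, if_pos, hpop]
        exact pv_items_ofList _ hndnew
      rw [hstep]
      have hst : kv :: (mv.reverse ++ c ++ r') = (mv ++ [kv]).reverse ++ c ++ r' := by simp
      rw [hst, hcast, ih (i+1) (mv ++ [kv]) c (by simp; omega) (by omega)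
        (by simp at hmlen ⊢; omega) hdrop' (by rw [← hst]; exact hndnew)]
      simp [hc]

-- B's partition loop over indices ≥ 1 is a filter split
lemma pv_loopB_inv (flat : List String) :
    ∀ (t : List (String × List String)) (s : Int), 1 ≤ s →
    ∀ (mv rest : List (String × List String)),
    (PySem.List.enumerate t s).foldl (pvStepB flat) (mv, rest)
      = (mv ++ t.filter (fun kv => !(flat.contains kv.1)),
         rest ++ t.filter (fun kv => flat.contains kv.1)) := by
  intro t
  induction t with
  | nil => intro s hs mv rest; simp [PySem.List.enumerate]
  | cons kv t ih =>
    intro s hs mv rest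
    rw [PySem.List.enumerate_cons]
    simp only [List.foldl_cons]
    have hpos : (0:Int) < s := by omega
    by_cases hc : kv.1 ∈ flat
    · have hstep : pvStepB flat (mv, rest) (s, kv) = (mv, rest ++ [kv]) := by
        simp [pvStepB, hc]
      rw [hstep, ih (s+1) (by omega)]
      simp [hc]
    · have hstep : pvStepB flat (mv, rest) (s, kv) = (mv ++ [kv], rest) := by
        simp [pvStepB, hc, hpos]
      rw [hstep, ih (s+1) (by omega)]
      simp [hc]

-- the two pairs of filters coincide and their recombination is a permutation of the input
lemma pv_perm (flat : List String) (kv0 : String × List String) (t : List (String × List String)) :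
    ((t.filter (fun kv => !(flat.contains kv.1))).reverse
      ++ (kv0 :: t.filter (fun kv => flat.contains kv.1))).Perm (kv0 :: t) := by
  refine List.Perm.trans List.perm_middle (List.Perm.cons _ ?_)
  have h1 : (t.filter (fun kv => !(flat.contains kv.1))).reverse.Perm
      (t.filter (fun kv => !(flat.contains kv.1))) := List.reverse_perm _
  refine List.Perm.trans (h1.append_right _) ?_
  have h2 : t.filter (fun kv => !!(flat.contains kv.1)) = t.filter (fun kv => flat.contains kv.1) :=
    List.filter_congr (by intro x _; simp)
  have h3 := List.filter_append_perm (fun kv => !(flat.contains kv.1)) t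
  rw [h2] at h3
  exact h3

-- ===== VERDICT (by name: the statement is the Claim_ definition above) =====
theorem ricerca_chiave_spec : Claim_equal_ricerca_chiave := by
  intro dga _hdom hpre
  unfold Spec_ricerca_chiave
  cases dga with
  | nil => rfl
  | cons kv0 t =>
    have hA : ricerca_chiave (kv0 :: t)
        = (t.filter (fun kv => !(((kv0 :: t).flatMap Prod.snd).contains kv.1))).reverse
          ++ (kv0 :: t.filter (fun kv => ((kv0 :: t).flatMap Prod.snd).contains kv.1)) := by
      have hflat : ((kv0 :: t).map Prod.snd).flatMap (fun sublist => sublist)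
          = (kv0 :: t).flatMap Prod.snd := by simp [List.flatMap_map]
      show (PySem.List.pyRange 0 ((((kv0 :: t).map Prod.fst)).length : Int)).foldl
          (pvStepA ((kv0 :: t).map Prod.fst)
            (((kv0 :: t).map Prod.snd).flatMap (fun sublist => sublist))) (kv0 :: t) = _
      rw [hflat]
      rw [PySem.List.pyRange_one_cons (by simp : (0:Int) < (((kv0 :: t).map Prod.fst).length : Int))]
      simp only [List.foldl_cons]
      have hstep0 : pvStepA ((kv0 :: t).map Prod.fst) ((kv0 :: t).flatMap Prod.snd) (kv0 :: t) 0
          = kv0 :: t := by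
        simp [pvStepA]
      have hone : (0:Int) + 1 = ((1 : Nat) : Int) := by norm_num
      rw [hstep0, hone]
      have hmain := pv_loopA_inv ((kv0 :: t).map Prod.fst) ((kv0 :: t).flatMap Prod.snd) t 1 [] [kv0]
        (by simp) (le_refl 1) (by simp; omega) (by simp) hpre
      simp only [List.reverse_nil, List.nil_append, List.singleton_append] at hmain
      rw [hmain]
    have hB : ricerca_chiave_alt (kv0 :: t)
        = (t.filter (fun kv => !(((kv0 :: t).flatMap Prod.snd).contains kv.1))).reverse
          ++ (kv0 :: t.filter (fun kv => ((kv0 :: t).flatMap Prod.snd).contains kv.1)) := by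
      show (PySem.Dict.ofList
          ((((PySem.List.enumerate (kv0 :: t)).foldl (pvStepB ((kv0 :: t).flatMap Prod.snd)) ([], [])).1).reverse
            ++ ((PySem.List.enumerate (kv0 :: t)).foldl (pvStepB ((kv0 :: t).flatMap Prod.snd)) ([], [])).2)).items = _
      rw [PySem.List.enumerate_cons]
      simp only [List.foldl_cons]
      have hstep0 : pvStepB ((kv0 :: t).flatMap Prod.snd) ([], []) (0, kv0) = ([], [kv0]) := by
        simp [pvStepB]
      rw [hstep0, pv_loopB_inv ((kv0 :: t).flatMap Prod.snd) t (0+1) (by norm_num) [] [kv0]]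
      simp only [List.nil_append]
      exact pv_items_ofList _
        ((((pv_perm ((kv0 :: t).flatMap Prod.snd) kv0 t).map Prod.fst).nodup_iff).mpr hpre)
    rw [hA, hB]
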